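-- pv_equiv track=rewrite | github.com/StephenMyerss/stephen_chess_project | main.py | king_check_bishop
-- ===== SOURCE A (Python) =====
-- black_locations = [(0, 7), (1, 7), (2, 7), (3, 7), (4, 7), (5, 7), (6, 7), (7,7),
--                   (0, 6), (1, 6), (2, 6), (3, 6), (4, 6), (5, 6), (6, 6), (7, 6)]
--
-- white_locations = [(0, 0), (1, 0), (2, 0), (3, 0), (4, 0), (5, 0), (6, 0), (7, 0),
--                   (0, 1), (1, 1), (2, 1), (3, 1), (4, 1), (5, 1), (6, 1), (7,1)]
--
-- def king_check_bishop(location, color):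
--     moves_list = []
--     if color == 'white':
--         friends_list = white_locations
--         enemies_list = black_locations
--     else:
--         friends_list = black_locations
--         enemies_list = white_locations
--     # Generate the directions a bishop can move IE if a biship is at positon (3,3) it could move to
--     # positon (x - 1, y -1) (x + 1, y + 1), (x + 1, y -1), and (x - 1, y + 1)
--     directions = [(1, 1), (-1, -1), (1, -1), (-1, 1)]
--     for direction in directions:
--         dx = direction[0]
--         dy = direction[1]
--
--         while (0 <= (location[0] + dx) <= 7) and (0 <= (location[1] + dy) <= 7):
--
--             if ((location[0] + dx, location[1] + dy)) in friends_list: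
--                 moves_list.append((location[0] + dx, location[1] + dy))
--                 break
--             else:
--                 moves_list.append((location[0] + dx, location[1] + dy))
--             # updated the loop control variables, while account for negative values
--             if dx < 0:
--                 dx = dx + -1
--             else:
--                 dx = dx + 1
--             if dy < 0:
--                 dy = dy + -1
--             else:
--                 dy = dy + 1
--
--     return moves_list
-- ===== SOURCE B (Python) =====
-- black_locations = [(0, 7), (1, 7), (2, 7), (3, 7), (4, 7), (5, 7), (6, 7), (7,7),
--                   (0, 6), (1, 6), (2, 6), (3, 6), (4, 6), (5, 6), (6, 6), (7, 6)]
--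
-- white_locations = [(0, 0), (1, 0), (2, 0), (3, 0), (4, 0), (5, 0), (6, 0), (7, 0),
--                   (0, 1), (1, 1), (2, 1), (3, 1), (4, 1), (5, 1), (6, 1), (7,1)]
--
-- def _steps(v, d):
--     # The steps k >= 1 with 0 <= v + k*d <= 7 form the contiguous interval
--     # [lo, hi] below; the walkable prefix 1..n is the whole interval when it
--     # starts at 1 or earlier, and empty otherwise.
--     lo, hi = (-v, 7 - v) if d == 1 else (v - 7, v)
--     return hi if lo <= 1 <= hi else 0
--
-- def king_check_bishop(location, color):
--     x, y = location
--     # The friendly pieces occupy exactly two full ranks, so a square on the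
--     # board is friendly iff its rank is one of these two.
--     ranks = (0, 1) if color == 'white' else (6, 7)
--     moves = []
--     for dx, dy in [(1, 1), (-1, -1), (1, -1), (-1, 1)]:
--         n = min(_steps(x, dx), _steps(y, dy))
--         # solve y + k*dy == r for each friendly rank r; keep hits inside 1..n
--         hits = [(r - y) * dy for r in ranks if 1 <= (r - y) * dy <= n]
--         m = min(hits) if hits else n
--         moves.extend((x + k * dx, y + k * dy) for k in range(1, m + 1))
--     return moves
-- ===== Notes on version B (the rewrite author's own statement) =====
-- stated objective: alternative
-- what changed: Replaces A's square-by-square diagonal walk with a membership scan of the friends list at every step by pure arithmetic: the on-board step count per direction is computed in closed form, the first blocking step is obtained by solving y + k*dy = r for the two friendly ranks (the friendly pieces occupy exactly two full ranks), and the moves are emitted as one range.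
import Mathlib
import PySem

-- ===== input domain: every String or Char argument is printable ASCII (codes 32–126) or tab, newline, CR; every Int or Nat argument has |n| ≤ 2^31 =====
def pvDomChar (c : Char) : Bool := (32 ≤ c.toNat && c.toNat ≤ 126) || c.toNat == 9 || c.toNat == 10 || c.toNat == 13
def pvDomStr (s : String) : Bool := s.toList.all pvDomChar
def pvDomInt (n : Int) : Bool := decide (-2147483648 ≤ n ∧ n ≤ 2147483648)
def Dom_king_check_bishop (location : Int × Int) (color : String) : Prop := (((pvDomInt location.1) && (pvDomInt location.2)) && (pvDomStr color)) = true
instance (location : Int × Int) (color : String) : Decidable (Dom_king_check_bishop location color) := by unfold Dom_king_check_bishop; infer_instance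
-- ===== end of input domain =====

-- B replaces A's square-by-square walk with membership scans by pure arithmetic: closed-form
-- step counts, the blocking step solved from the friendly ranks, moves emitted as one range
-- (objective: alternative; same cost on this 8×8 board).

-- ===== PORT A =====
def pvBlackLocs : List (Int × Int) :=
  [(0, 7), (1, 7), (2, 7), (3, 7), (4, 7), (5, 7), (6, 7), (7, 7),
   (0, 6), (1, 6), (2, 6), (3, 6), (4, 6), (5, 6), (6, 6), (7, 6)]

def pvWhiteLocs : List (Int × Int) :=
  [(0, 0), (1, 0), (2, 0), (3, 0), (4, 0), (5, 0), (6, 0), (7, 0),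
   (0, 1), (1, 1), (2, 1), (3, 1), (4, 1), (5, 1), (6, 1), (7, 1)]

-- A's inner while loop; fuel 8 is exact: the x-coordinates appended along one direction are
-- distinct consecutive integers in [0,7], so the loop body runs at most 8 times and at fuel 0
-- the real loop's condition is necessarily false as well.
def pvALoop (fuel : Nat) (x y dx dy : Int) (friends : List (Int × Int))
    (acc : List (Int × Int)) : List (Int × Int) :=
  match fuel with
  | 0 => acc
  | fuel + 1 =>
    if 0 ≤ x + dx ∧ x + dx ≤ 7 ∧ 0 ≤ y + dy ∧ y + dy ≤ 7 then
      if (x + dx, y + dy) ∈ friends then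
        acc ++ [(x + dx, y + dy)]
      else
        pvALoop fuel x y (if dx < 0 then dx + -1 else dx + 1)
          (if dy < 0 then dy + -1 else dy + 1) friends (acc ++ [(x + dx, y + dy)])
    else acc

def king_check_bishop (location : Int × Int) (color : String) : List (Int × Int) :=
  let friends := if color == "white" then pvWhiteLocs else pvBlackLocs
  [((1 : Int), (1 : Int)), (-1, -1), (1, -1), (-1, 1)].foldl
    (fun moves d => pvALoop 8 location.1 location.2 d.1 d.2 friends moves) []

-- ===== PORT B =====
-- the steps k ≥ 1 with 0 ≤ v + k*d ≤ 7 form the interval [lo, hi]; the walkable prefix 1..n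
-- is the whole interval when it starts at 1 or earlier, and empty otherwise
def pvSteps (v d : Int) : Int :=
  let lo := if d == 1 then -v else v - 7
  let hi := if d == 1 then 7 - v else v
  if lo ≤ 1 ∧ 1 ≤ hi then hi else 0

def king_check_bishop_alt (location : Int × Int) (color : String) : List (Int × Int) :=
  let x := location.1
  let y := location.2
  -- the friendly pieces occupy exactly two full ranks, so an on-board square is friendly
  -- iff its rank is one of these two
  let ranks : List Int := if color == "white" then [0, 1] else [6, 7]
  [((1 : Int), (1 : Int)), (-1, -1), (1, -1), (-1, 1)].foldl
    (fun moves d =>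
      let n := min (pvSteps x d.1) (pvSteps y d.2)
      -- solve y + k*dy = r for each friendly rank r; keep hits inside 1..n
      let hits := (ranks.filter (fun r => 1 ≤ (r - y) * d.2 ∧ (r - y) * d.2 ≤ n)).map
        (fun r => (r - y) * d.2)
      let m := match PySem.List.min? hits (fun k => k) with  -- min(hits) if hits else n
        | some k => k
        | none => n
      moves ++ (PySem.List.pyRange 1 (m + 1) 1).map (fun k => (x + k * d.1, y + k * d.2)))
    []

-- ===== PRECONDITION & SPEC =====
def Spec_king_check_bishop (location : Int × Int) (color : String) (out : List (Int × Int)) : Prop := out = king_check_bishop_alt location color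
instance (location : Int × Int) (color : String) (out : List (Int × Int)) : Decidable (Spec_king_check_bishop location color out) := by unfold Spec_king_check_bishop; infer_instance

-- ===== CLAIM (what is proved, stated in full; the proofs are below) =====
def Claim_equal_king_check_bishop : Prop := ∀ (location : Int × Int) (color : String), Dom_king_check_bishop location color → Spec_king_check_bishop location color (king_check_bishop location color)

-- ===== LEMMAS AND PROOFS =====

lemma pvALoop_stop (fuel : Nat) (x y dx dy : Int) (friends : List (Int × Int))
    (acc : List (Int × Int))
    (h : ¬(0 ≤ x + dx ∧ x + dx ≤ 7 ∧ 0 ≤ y + dy ∧ y + dy ≤ 7)) :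
    pvALoop fuel x y dx dy friends acc = acc := by
  cases fuel <;> simp [pvALoop, h]

lemma pvSteps_out (v d : Int) (h : v < -1 ∨ 8 < v) : pvSteps v d = 0 := by
  simp only [pvSteps]
  split_ifs <;> omega

lemma pvSteps_nonneg (v d : Int) : 0 ≤ pvSteps v d := by
  simp only [pvSteps]; split_ifs <;> omega

-- both programs return [] when the location is far off the board
lemma pv_out_of_range (x y : Int) (color : String)
    (h : x < -1 ∨ 8 < x ∨ y < -1 ∨ 8 < y) :
    king_check_bishop (x, y) color = king_check_bishop_alt (x, y) color := by
  have hn : ∀ dx dy : Int, min (pvSteps x dx) (pvSteps y dy) = 0 := by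
    intro dx dy
    have h1 := pvSteps_nonneg x dx
    have h2 := pvSteps_nonneg y dy
    rcases h with h | h | h | h
    · rw [pvSteps_out x dx (by omega)]; omega
    · rw [pvSteps_out x dx (by omega)]; omega
    · rw [pvSteps_out y dy (by omega)]; omega
    · rw [pvSteps_out y dy (by omega)]; omega
  unfold king_check_bishop king_check_bishop_alt
  simp only [List.foldl]
  rw [pvALoop_stop 8 x y 1 1 _ _ (by omega),
      pvALoop_stop 8 x y (-1) (-1) _ _ (by omega),
      pvALoop_stop 8 x y 1 (-1) _ _ (by omega),
      pvALoop_stop 8 x y (-1) 1 _ _ (by omega)]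
  have hf : ∀ (dy n : Int) (rs : List Int), n = 0 →
      rs.filter (fun r => decide (1 ≤ (r - y) * dy ∧ (r - y) * dy ≤ n)) = [] := by
    intro dy n rs hn0
    subst hn0
    refine List.filter_eq_nil_iff.mpr ?_
    intro r _
    simp only [decide_eq_true_eq, not_and]
    intro h1
    nlinarith
  have e : PySem.List.pyRange (1 : Int) ((0 : Int) + 1) 1 = [] := by decide
  simp only [hn, hf _ _ _ rfl, PySem.List.min?, List.foldl_nil, e, List.map_nil,
    List.append_nil]

-- ===== VERDICT (by name: the statement is the Claim_ definition above) =====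
theorem king_check_bishop_spec : Claim_equal_king_check_bishop := by
  intro ⟨x, y⟩ color _
  unfold Spec_king_check_bishop
  by_cases hin : -1 ≤ x ∧ x ≤ 8 ∧ -1 ≤ y ∧ y ≤ 8
  · obtain ⟨hx1, hx2, hy1, hy2⟩ := hin
    cases hc : color == "white" <;>
      simp only [king_check_bishop, king_check_bishop_alt, hc, if_pos, if_neg,
        Bool.false_eq_true, not_false_iff] <;>
      interval_cases x <;> interval_cases y <;> decide
  · exact pv_out_of_range x y color (by omega)
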